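-- pv_equiv track=rewrite | github.com/edesarrollo2021/OSITECH | base_mexico/pyfiscal/utils.py | remove_names
-- ===== SOURCE A (Python) =====
-- NAMES = [
--         'JOSE ', 'JOSÉ', 'J ', 'MARIA ', 'MA. ', 'DE ', ' DE ', 'DEL ', ' DEL ', 'LA ', ' LA ',
--         'JOSE', 'J', 'MARIA', 'MARÍA', 'MA.', 'DE', ' DEL', 'LA',
--         'LAS ', ' LAS ', 'LOS ', ' LOS ', 'MC ', 'MC ', 'MAC ', 'VON ', 'VAN ', ' Y '
--         'LAS', 'LOS', 'MC', 'MAC', 'VON', 'VAN', 'Y'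
-- ]
--
-- def remove_names(name):
--     "Remove defined names in the tuple."
--     name = name.split()
--     data = []
--     if len(name) > 1:
--         for n in name:
--             if n in NAMES:
--                 data.append(name[1])
--                 break
--             else:
--                 data.append(name[1])
--     else:
--         data += name
--     return data[0]
-- ===== SOURCE B (Python) =====
-- def remove_names(name):
--     "Remove defined names in the tuple."
--     t = name.split()
--     return t[1] if len(t) > 1 else t[0]
-- ===== Notes on version B (the rewrite author's own statement) =====
-- stated objective: simpler
-- what changed: A's loop appends name[1] in both branches, so its NAMES membership test and accumulator list are dead; B splits once and returns the second token (or the single token) as one closed-form expression.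
import Mathlib
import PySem

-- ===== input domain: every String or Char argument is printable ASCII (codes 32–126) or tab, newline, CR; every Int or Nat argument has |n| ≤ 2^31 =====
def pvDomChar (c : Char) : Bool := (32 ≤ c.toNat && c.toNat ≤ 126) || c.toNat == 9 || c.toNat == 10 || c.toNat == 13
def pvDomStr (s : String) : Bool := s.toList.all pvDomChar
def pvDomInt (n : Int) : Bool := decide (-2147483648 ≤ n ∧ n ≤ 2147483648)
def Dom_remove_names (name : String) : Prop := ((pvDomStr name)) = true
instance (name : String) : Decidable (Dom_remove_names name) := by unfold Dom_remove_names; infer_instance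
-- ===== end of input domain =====

-- ===== PORT A =====
-- One honest line: B replaces A's dead loop over NAMES (both branches append name[1]) by a single
-- closed-form selection of the second token, else the single token; objective: simpler.
def NAMES : List String :=
  ["JOSE ", "JOSÉ", "J ", "MARIA ", "MA. ", "DE ", " DE ", "DEL ", " DEL ", "LA ", " LA ",
   "JOSE", "J", "MARIA", "MARÍA", "MA.", "DE", " DEL", "LA",
   "LAS ", " LAS ", "LOS ", " LOS ", "MC ", "MC ", "MAC ", "VON ", "VAN ", " Y LAS",
   "LOS", "MC", "MAC", "VON", "VAN", "Y"]

-- the for-loop of A, with break: appends name[1] each iteration; break stops after the append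
def removeNamesLoop (tokens : List String) (name1 : String) (data : List String) : List String :=
  match tokens with
  | [] => data
  | n :: rest =>
      if n ∈ NAMES then data ++ [name1]
      else removeNamesLoop rest name1 (data ++ [name1])

def remove_names (name : String) : String :=
  let name' := PySem.Str.split₀ name
  let data : List String :=
    if name'.length > 1 then
      removeNamesLoop name' ((PySem.List.pyGet? name' 1).getD "") []
    else [] ++ name'
  (PySem.List.pyGet? data 0).getD ""   -- Pre_ guarantees data ≠ [], so the default is never used

-- ===== PORT B =====
def remove_names_alt (name : String) : String :=
  let t := PySem.Str.split₀ name
  if t.length > 1 then (PySem.List.pyGet? t 1).getD ""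
  else (PySem.List.pyGet? t 0).getD ""   -- Pre_ guarantees t ≠ [], so the defaults are never used

-- ===== PRECONDITION & SPEC =====
-- Pre_ excludes exactly the inputs where name.split() is empty (whitespace-only name): A raises IndexError there.
def Pre_remove_names (name : String) : Prop := PySem.Str.split₀ name ≠ []
instance (name : String) : Decidable (Pre_remove_names name) := by unfold Pre_remove_names; infer_instance
def pvWitness_remove_names : String := "JOSE LUIS"
def Spec_remove_names (name : String) (out : String) : Prop := out = remove_names_alt name
instance (name : String) (out : String) : Decidable (Spec_remove_names name out) := by unfold Spec_remove_names; infer_instance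

-- ===== CLAIM (what is proved, stated in full; the proofs are below) =====
def Claim_equal_remove_names : Prop := ∀ (name : String), Dom_remove_names name → Pre_remove_names name → Spec_remove_names name (remove_names name)

-- ===== LEMMAS AND PROOFS =====
-- the loop never changes the head of a nonempty accumulator
theorem removeNamesLoop_head (tokens : List String) (n1 : String) (data : List String)
    (h : data ≠ []) : (removeNamesLoop tokens n1 data).head? = data.head? := by
  induction tokens generalizing data with
  | nil => rfl
  | cons n rest ih =>
      simp only [removeNamesLoop]
      split
      · cases data with
        | nil => exact absurd rfl h
        | cons x xs => simp
      · rw [ih (data ++ [n1]) (by simp)]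
        cases data with
        | nil => exact absurd rfl h
        | cons x xs => simp

-- started on an empty accumulator with a nonempty token list, the loop's first element is name[1]
theorem removeNamesLoop_head_nil (tokens : List String) (n1 : String) (h : tokens ≠ []) :
    (removeNamesLoop tokens n1 []).head? = some n1 := by
  cases tokens with
  | nil => exact absurd rfl h
  | cons n rest =>
      simp only [removeNamesLoop]
      split
      · rfl
      · rw [List.nil_append, removeNamesLoop_head rest n1 [n1] (by simp)]; rfl

theorem pyGet?_zero_eq_head? {α : Type} (xs : List α) : PySem.List.pyGet? xs 0 = xs.head? := by
  rw [PySem.List.pyGet?_zero]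
  cases xs <;> rfl

-- ===== VERDICT (by name: the statement is the Claim_ definition above) =====
theorem remove_names_spec : Claim_equal_remove_names := by
  intro name _ hpre
  unfold Spec_remove_names remove_names remove_names_alt
  set t := PySem.Str.split₀ name with ht
  simp only []
  by_cases h : t.length > 1
  · simp only [h, if_pos]
    rw [pyGet?_zero_eq_head?,
        removeNamesLoop_head_nil t _ (by intro h0; rw [h0] at h; simp at h)]
    rfl
  · simp only [h, List.nil_append]
    simp
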